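-- pv_equiv track=rewrite | github.com/epilectrik/voynich | context/generate_expert_context.py | _compact_model_context
-- ===== SOURCE A (Python) =====
-- _MC_REMOVE_SECTIONS = [
--     'X.B. APPARATUS-CENTRIC',
--     'XII. HISTORICAL',
-- ]
--
-- _MC_COMPRESS_SECTIONS = {
--     'V. GLOBAL MORPHOLOGICAL': 65,
--     'VI. CURRIER B': 55,
--     'VII. CURRIER A': 35,
--     'VIII. AZC': 30,
-- }
--
-- def _compact_model_context(content):
--     """Cognitively compress MODEL_CONTEXT.
--
--     Compress V (morphology), VI (B), VII (A), VIII (AZC) to core concepts.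
--     Remove X.B and XII (redundant with INTERPRETATION_SUMMARY).
--     Keep governance sections I-IV, IX, XI, XIII-XVI in full.
--     """
--     lines = content.split('\n')
--     result = []
--     state = 'keep'  # 'keep', 'remove', 'compress'
--     compress_limit = 0
--     lines_in_section = 0
--
--     for line in lines:
--         # Detect ## section headers
--         if line.startswith('## '):
--             header = line[3:].strip()
--
--             # Check if this section should be removed
--             if any(header.startswith(r) for r in _MC_REMOVE_SECTIONS):
--                 state = 'remove'
--                 result.append(line)
--                 result.append('')
--                 result.append('*[Section condensed — content available in INTERPRETATION_SUMMARY or structural contracts.]*')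
--                 result.append('')
--                 continue
--
--             # Check if this section should be compressed
--             matched = False
--             for prefix, limit in _MC_COMPRESS_SECTIONS.items():
--                 if header.startswith(prefix):
--                     state = 'compress'
--                     compress_limit = limit
--                     lines_in_section = 0
--                     matched = True
--                     break
--
--             if not matched:
--                 state = 'keep'
--
--             result.append(line)
--             continue
--
--         if state == 'keep':
--             result.append(line)
--         elif state == 'remove':
--             continue
--         elif state == 'compress':
--             lines_in_section += 1
--             if lines_in_section <= compress_limit:
--                 result.append(line)
--             elif lines_in_section == compress_limit + 1:
--                 result.append('')
--                 result.append('*[Remaining detail available in structural contracts.]*')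
--                 result.append('')
--
--     return '\n'.join(result)
-- ===== SOURCE B (Python) =====
-- _MC_REMOVE_SECTIONS = [
--     'X.B. APPARATUS-CENTRIC',
--     'XII. HISTORICAL',
-- ]
--
-- _MC_COMPRESS_SECTIONS = {
--     'V. GLOBAL MORPHOLOGICAL': 65,
--     'VI. CURRIER B': 55,
--     'VII. CURRIER A': 35,
--     'VIII. AZC': 30,
-- }
--
-- _MC_REMOVED_NOTICE = '*[Section condensed — content available in INTERPRETATION_SUMMARY or structural contracts.]*'
-- _MC_COMPRESSED_NOTICE = '*[Remaining detail available in structural contracts.]*'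
--
--
-- def _compact_model_context(content):
--     """Section-based rewrite: partition into sections once, then emit per section."""
--     lines = content.split('\n')
--
--     # Partition: leading lines before the first '## ' header, then (header, body) sections.
--     lead = []
--     i = 0
--     while i < len(lines) and not lines[i].startswith('## '):
--         lead.append(lines[i])
--         i += 1
--     sections = []
--     while i < len(lines):
--         h = lines[i]
--         i += 1
--         body = []
--         while i < len(lines) and not lines[i].startswith('## '):
--             body.append(lines[i])
--             i += 1
--         sections.append((h, body))
--
--     out = list(lead)
--     for h, body in sections:
--         header = h[3:].strip()
--         out.append(h)
--         if any(header.startswith(r) for r in _MC_REMOVE_SECTIONS):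
--             out += ['', _MC_REMOVED_NOTICE, '']
--         else:
--             limit = next((l for p, l in _MC_COMPRESS_SECTIONS.items()
--                           if header.startswith(p)), None)
--             if limit is None:
--                 out += body
--             else:
--                 out += body[:limit]
--                 if len(body) > limit:
--                     out += ['', _MC_COMPRESSED_NOTICE, '']
--     return '\n'.join(out)
-- ===== Notes on version B (the rewrite author's own statement) =====
-- stated objective: simpler
-- what changed: Replaced A's four-variable line-by-line state machine (state string, compress limit, running counter) by a single partition of the lines into a leading block plus (header, body) sections, followed by a stateless per-section emitter that slices each body to its limit.
import Mathlib
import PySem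

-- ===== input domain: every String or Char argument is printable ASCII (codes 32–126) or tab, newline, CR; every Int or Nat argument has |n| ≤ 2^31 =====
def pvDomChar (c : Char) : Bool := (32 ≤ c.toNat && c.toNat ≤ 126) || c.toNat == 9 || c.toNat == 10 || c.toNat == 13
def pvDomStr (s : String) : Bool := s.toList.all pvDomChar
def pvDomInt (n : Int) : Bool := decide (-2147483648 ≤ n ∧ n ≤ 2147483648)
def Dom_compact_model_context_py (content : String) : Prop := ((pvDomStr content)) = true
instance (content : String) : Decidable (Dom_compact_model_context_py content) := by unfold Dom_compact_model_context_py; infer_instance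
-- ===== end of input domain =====

-- B re-implements A's line-by-line state machine as a one-pass partition into (header, body)
-- sections followed by a per-section emitter (objective: simpler decomposition, same cost).

-- shared module constants
def mcRemoveSections : List String := ["X.B. APPARATUS-CENTRIC", "XII. HISTORICAL"]

def mcCompressSections : List (String × Int) :=
  [("V. GLOBAL MORPHOLOGICAL", 65), ("VI. CURRIER B", 55), ("VII. CURRIER A", 35), ("VIII. AZC", 30)]

def mcRemovedNotice : String :=
  "*[Section condensed — content available in INTERPRETATION_SUMMARY or structural contracts.]*"

def mcCompressedNotice : String := "*[Remaining detail available in structural contracts.]*"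

-- first compress prefix matching the header (A's for/break loop; B's next(…) over the same dict)
def findCompress : List (String × Int) → String → Option Int
  | [], _ => none
  | (p, lim) :: rest, header =>
      if PySem.Str.startswith header p then some lim else findCompress rest header

-- ===== PORT A =====
-- loop body of A: state = (result, state-string, compress_limit, lines_in_section)
def stepA (acc : List String × String × Int × Int) (line : String) : List String × String × Int × Int :=
  let (result, state, compress_limit, lines_in_section) := acc
  if PySem.Str.startswith line "## " then
    let header := PySem.Str.strip (PySem.Str.slice line (some 3) none)
    if mcRemoveSections.any (fun r => PySem.Str.startswith header r) then
      (result ++ [line, "", mcRemovedNotice, ""], "remove", compress_limit, lines_in_section)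
    else
      match findCompress mcCompressSections header with
      | some limit => (result ++ [line], "compress", limit, 0)
      | none => (result ++ [line], "keep", compress_limit, lines_in_section)
  else if state == "keep" then
    (result ++ [line], state, compress_limit, lines_in_section)
  else if state == "remove" then
    (result, state, compress_limit, lines_in_section)
  else
    let lis := lines_in_section + 1
    if lis ≤ compress_limit then
      (result ++ [line], state, compress_limit, lis)
    else if lis == compress_limit + 1 then
      (result ++ ["", mcCompressedNotice, ""], state, compress_limit, lis)
    else
      (result, state, compress_limit, lis)

def compact_model_context_py (content : String) : String :=
  let lines := (PySem.Str.split? content "\n").getD []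
  PySem.Str.join "\n" (lines.foldl stepA ([], "keep", 0, 0)).1

-- ===== PORT B =====
def mcIsHeader (l : String) : Bool := PySem.Str.startswith l "## "

-- partition the tail (starting at a header line) into (header, body) sections
def parseSections : List String → List (String × List String)
  | [] => []
  | h :: rest =>
      (h, rest.takeWhile (fun l => !mcIsHeader l)) ::
        parseSections (rest.dropWhile (fun l => !mcIsHeader l))
termination_by xs => xs.length
decreasing_by
  simpa using Nat.lt_succ_of_le (List.length_dropWhile_le _ rest)

def emitSection (sec : String × List String) : List String :=
  let (h, body) := sec
  let header := PySem.Str.strip (PySem.Str.slice h (some 3) none)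
  if mcRemoveSections.any (fun r => PySem.Str.startswith header r) then
    [h, "", mcRemovedNotice, ""]
  else
    match findCompress mcCompressSections header with
    | none => h :: body
    | some limit =>
        h :: PySem.List.slice body none (some limit) ++
          (if limit < (body.length : Int) then ["", mcCompressedNotice, ""] else [])

def compact_model_context_py_alt (content : String) : String :=
  let lines := (PySem.Str.split? content "\n").getD []
  let lead := lines.takeWhile (fun l => !mcIsHeader l)
  let sections := parseSections (lines.dropWhile (fun l => !mcIsHeader l))
  PySem.Str.join "\n" (lead ++ sections.flatMap emitSection)

-- ===== PRECONDITION & SPEC =====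
def Spec_compact_model_context_py (content : String) (out : String) : Prop := out = compact_model_context_py_alt content
instance (content : String) (out : String) : Decidable (Spec_compact_model_context_py content out) := by unfold Spec_compact_model_context_py; infer_instance

-- ===== CLAIM (what is proved, stated in full; the proofs are below) =====
def Claim_equal_compact_model_context_py : Prop := ∀ (content : String), Dom_compact_model_context_py content → Spec_compact_model_context_py content (compact_model_context_py content)

-- ===== LEMMAS AND PROOFS =====
-- ===== LEMMAS AND PROOFS =====

-- output emitted by A's loop from a given (state, limit, counter)
def outA (st : String) (lim cnt : Int) (lines : List String) : List String :=
  (lines.foldl stepA ([], st, lim, cnt)).1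

-- what A's compress state emits over a body, starting from counter cnt
def compEmit (lim cnt : Int) (b : List String) : List String :=
  b.take (lim - cnt).toNat ++
    (if cnt ≤ lim ∧ lim - cnt < (b.length : Int) then ["", mcCompressedNotice, ""] else [])

-- what A emits over the leading body given the current state
def pref (st : String) (lim cnt : Int) (b : List String) : List String :=
  if st == "keep" then b else if st == "remove" then [] else compEmit lim cnt b

theorem stepA_split (res : List String) (st : String) (lim cnt : Int) (l : String) :
    stepA (res, st, lim, cnt) l =
      (res ++ (stepA ([], st, lim, cnt) l).1, (stepA ([], st, lim, cnt) l).2) := by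
  simp only [stepA]
  by_cases h1 : PySem.Str.startswith l "## " = true
  · rw [if_pos h1, if_pos h1]
    by_cases h2 : mcRemoveSections.any
        (fun r => PySem.Str.startswith (PySem.Str.strip (PySem.Str.slice l (some 3) none)) r) = true
    · rw [if_pos h2, if_pos h2]; simp
    · rw [if_neg h2, if_neg h2]
      rcases h3 : findCompress mcCompressSections
          (PySem.Str.strip (PySem.Str.slice l (some 3) none)) with _ | lim' <;> simp
  · rw [if_neg h1, if_neg h1]
    split_ifs <;> simp

theorem foldl_stepA_res (lines : List String) :
    ∀ (res : List String) (st : String) (lim cnt : Int),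
      (lines.foldl stepA (res, st, lim, cnt)).1 = res ++ (lines.foldl stepA ([], st, lim, cnt)).1 := by
  induction lines with
  | nil => simp
  | cons l ls ih =>
      intro res st lim cnt
      rcases h : stepA ([], st, lim, cnt) l with ⟨r', st', lim', cnt'⟩
      simp only [List.foldl_cons, stepA_split res st lim cnt l, h]
      rw [ih (res ++ r') st' lim' cnt', ih r' st' lim' cnt', List.append_assoc]

theorem outA_cons (st : String) (lim cnt : Int) (l : String) (ls : List String) :
    outA st lim cnt (l :: ls) =
      (stepA ([], st, lim, cnt) l).1 ++
        outA (stepA ([], st, lim, cnt) l).2.1 (stepA ([], st, lim, cnt) l).2.2.1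
          (stepA ([], st, lim, cnt) l).2.2.2 ls := by
  rcases h : stepA ([], st, lim, cnt) l with ⟨r', st', lim', cnt'⟩
  simp only [outA, List.foldl_cons, h]
  rw [foldl_stepA_res ls r' st' lim' cnt']

theorem findCompress_nonneg (h : String) (lim : Int)
    (hf : findCompress mcCompressSections h = some lim) : 0 ≤ lim := by
  simp only [findCompress, mcCompressSections] at hf
  split_ifs at hf <;> simp_all <;> omega

theorem pref_nil (st : String) (lim cnt : Int) : pref st lim cnt [] = [] := by
  simp only [pref, compEmit, List.take_nil, List.length_nil, List.nil_append]
  split_ifs with h1 h2 h3 <;> first | rfl | (exfalso; push_cast at *; omega)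

theorem pref_keep (lim cnt : Int) (b : List String) : pref "keep" lim cnt b = b := by
  simp [pref]

theorem pref_remove (lim cnt : Int) (b : List String) : pref "remove" lim cnt b = [] := by
  simp [pref]

theorem pref_other (st : String) (hk : (st == "keep") = false) (hr : (st == "remove") = false)
    (lim cnt : Int) (b : List String) : pref st lim cnt b = compEmit lim cnt b := by
  simp [pref, hk, hr]

theorem compEmit_over (lim cnt : Int) (b : List String) (hc : lim < cnt) :
    compEmit lim cnt b = [] := by
  simp only [compEmit]
  rw [if_neg (by rintro ⟨h, _⟩; omega)]
  have h0 : (lim - cnt).toNat = 0 := by omega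
  simp [h0]

theorem compEmit_cons_le (lim cnt : Int) (l : String) (b : List String)
    (h1 : cnt + 1 ≤ lim) : compEmit lim cnt (l :: b) = l :: compEmit lim (cnt + 1) b := by
  simp only [compEmit]
  have hif : (cnt ≤ lim ∧ lim - cnt < ((l :: b).length : Int)) ↔
      (cnt + 1 ≤ lim ∧ lim - (cnt + 1) < (b.length : Int)) := by
    simp only [List.length_cons]
    push_cast
    omega
  rw [if_congr hif rfl rfl]
  have h : (lim - cnt).toNat = (lim - (cnt + 1)).toNat + 1 := by omega
  rw [h, List.take_succ_cons]
  simp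

theorem compEmit_hit (lim cnt : Int) (l : String) (b : List String) (hc : cnt = lim) :
    compEmit lim cnt (l :: b) = ["", mcCompressedNotice, ""] := by
  subst hc
  simp only [compEmit]
  have h0 : (cnt - cnt).toNat = 0 := by omega
  rw [h0, List.take_zero]
  rw [if_pos ⟨le_refl _, by simp only [List.length_cons]; push_cast; omega⟩]
  simp

theorem emitSection_remove (h : String) (b : List String)
    (hrm : mcRemoveSections.any
      (fun r => PySem.Str.startswith (PySem.Str.strip (PySem.Str.slice h (some 3) none)) r) = true) :
    emitSection (h, b) = [h, "", mcRemovedNotice, ""] := by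
  simp only [emitSection]; rw [if_pos hrm]

theorem emitSection_keep (h : String) (b : List String)
    (hrm : ¬ mcRemoveSections.any
      (fun r => PySem.Str.startswith (PySem.Str.strip (PySem.Str.slice h (some 3) none)) r) = true)
    (hf : findCompress mcCompressSections
      (PySem.Str.strip (PySem.Str.slice h (some 3) none)) = none) :
    emitSection (h, b) = h :: b := by
  simp only [emitSection]; rw [if_neg hrm, hf]

theorem emitSection_compress (h : String) (b : List String) (limit : Int)
    (hrm : ¬ mcRemoveSections.any
      (fun r => PySem.Str.startswith (PySem.Str.strip (PySem.Str.slice h (some 3) none)) r) = true)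
    (hf : findCompress mcCompressSections
      (PySem.Str.strip (PySem.Str.slice h (some 3) none)) = some limit) :
    emitSection (h, b) = h :: PySem.List.slice b none (some limit) ++
      (if limit < (b.length : Int) then ["", mcCompressedNotice, ""] else []) := by
  simp only [emitSection]; rw [if_neg hrm, hf]

-- the main structural invariant: A's loop output from any state is
-- "prefix emission over the leading body" ++ "B's per-section emission of the parsed rest"
theorem outA_eq (lines : List String) :
    ∀ (st : String) (lim cnt : Int),
      outA st lim cnt lines =
        pref st lim cnt (lines.takeWhile (fun l => !mcIsHeader l)) ++
          (parseSections (lines.dropWhile (fun l => !mcIsHeader l))).flatMap emitSection := by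
  induction lines with
  | nil => intro st lim cnt; simp [outA, parseSections, pref_nil]
  | cons l ls ih =>
      intro st lim cnt
      rw [outA_cons]
      by_cases hH : mcIsHeader l = true
      · -- header line: A resets state; B starts a new section
        have hsw : PySem.Str.startswith l "## " = true := hH
        have htw : (l :: ls).takeWhile (fun l => !mcIsHeader l) = [] := by simp [hH]
        have hdw : (l :: ls).dropWhile (fun l => !mcIsHeader l) = l :: ls := by simp [hH]
        rw [htw, hdw, parseSections, pref_nil, List.nil_append, List.flatMap_cons]
        by_cases hrm : mcRemoveSections.any
            (fun r => PySem.Str.startswith (PySem.Str.strip (PySem.Str.slice l (some 3) none)) r) = true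
        · have hst : stepA ([], st, lim, cnt) l =
              ([l, "", mcRemovedNotice, ""], "remove", lim, cnt) := by
            simp only [stepA]; rw [if_pos hsw, if_pos hrm]; simp
          rw [hst, ih, pref_remove, emitSection_remove l _ hrm]
          simp
        · rcases hf : findCompress mcCompressSections
              (PySem.Str.strip (PySem.Str.slice l (some 3) none)) with _ | limit
          · have hst : stepA ([], st, lim, cnt) l = ([l], "keep", lim, cnt) := by
              simp only [stepA]; rw [if_pos hsw, if_neg hrm, hf]; simp
            rw [hst, ih, pref_keep, emitSection_keep l _ hrm hf]
            simp
          · have hst : stepA ([], st, lim, cnt) l = ([l], "compress", limit, 0) := by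
              simp only [stepA]; rw [if_pos hsw, if_neg hrm, hf]; simp
            rw [hst, ih, pref_other "compress" rfl rfl, emitSection_compress l _ limit hrm hf]
            have h0 : (0 : Int) ≤ limit := findCompress_nonneg _ _ hf
            simp only [compEmit, Int.sub_zero]
            rw [PySem.List.slice_to _ h0]
            simp [and_iff_right h0]
      · -- body line: behaviour depends on the state
        have hH' : mcIsHeader l = false := by simpa using hH
        have hsw : ¬ PySem.Str.startswith l "## " = true := by
          simpa [mcIsHeader] using hH
        have htw : (l :: ls).takeWhile (fun l => !mcIsHeader l) =
            l :: ls.takeWhile (fun l => !mcIsHeader l) := by simp [hH']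
        have hdw : (l :: ls).dropWhile (fun l => !mcIsHeader l) =
            ls.dropWhile (fun l => !mcIsHeader l) := by simp [hH']
        rw [htw, hdw]
        by_cases hk : st = "keep"
        · subst hk
          have hst : stepA ([], "keep", lim, cnt) l = ([l], "keep", lim, cnt) := by
            simp only [stepA]; rw [if_neg hsw]; simp
          rw [hst, ih, pref_keep, pref_keep]
          simp
        · by_cases hr : st = "remove"
          · subst hr
            have hst : stepA ([], "remove", lim, cnt) l = ([], "remove", lim, cnt) := by
              simp only [stepA]; rw [if_neg hsw]; simp
            rw [hst, ih, pref_remove, pref_remove]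
            simp
          · -- compress (or any other state string): counter dynamics
            have hk' : (st == "keep") = false := by simpa using hk
            have hr' : (st == "remove") = false := by simpa using hr
            have hnk : ¬ ((st == "keep") = true) := by simp [hk']
            have hnr : ¬ ((st == "remove") = true) := by simp [hr']
            have hlen := Int.natCast_nonneg ((ls.takeWhile (fun l => !mcIsHeader l)).length)
            by_cases h1 : cnt + 1 ≤ lim
            · have hst : stepA ([], st, lim, cnt) l = ([l], st, lim, cnt + 1) := by
                simp only [stepA]; rw [if_neg hsw, if_neg hnk, if_neg hnr, if_pos h1]; simp
              rw [hst, ih, pref_other st hk' hr', pref_other st hk' hr',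
                compEmit_cons_le lim cnt l _ h1]
              simp
            · by_cases h2 : cnt + 1 = lim + 1
              · have hst : stepA ([], st, lim, cnt) l =
                    (["", mcCompressedNotice, ""], st, lim, cnt + 1) := by
                  simp only [stepA]
                  rw [if_neg hsw, if_neg hnk, if_neg hnr, if_neg h1,
                    if_pos (by simpa using h2)]
                  simp
                rw [hst, ih, pref_other st hk' hr', pref_other st hk' hr',
                  compEmit_hit lim cnt l _ (by omega), compEmit_over lim (cnt + 1) _ (by omega)]
                simp
              · have hst : stepA ([], st, lim, cnt) l = ([], st, lim, cnt + 1) := by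
                  simp only [stepA]
                  rw [if_neg hsw, if_neg hnk, if_neg hnr, if_neg h1,
                    if_neg (by simpa using h2)]
                rw [hst, ih, pref_other st hk' hr', pref_other st hk' hr',
                  compEmit_over lim cnt _ (by omega), compEmit_over lim (cnt + 1) _ (by omega)]
                simp

-- ===== VERDICT (by name: the statement is the Claim_ definition above) =====
theorem compact_model_context_py_spec : Claim_equal_compact_model_context_py := by
  intro content _
  unfold Spec_compact_model_context_py compact_model_context_py compact_model_context_py_alt
  refine congrArg (PySem.Str.join "\n") ?_
  have h := outA_eq ((PySem.Str.split? content "\n").getD []) "keep" 0 0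
  unfold outA pref at h
  simpa using h
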